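-- pv_equiv track=rewrite | github.com/pypi-data/pypi-mirror-82 | packages/fortran-align/fortran-align-0.0.7.tar.gz/fortran-align-0.0.7/falign/falign.py | _comment_index
-- ===== SOURCE A (Python) =====
-- from typing import List, Optional
--
-- def _comment_index(line: str) -> Optional[int]:
--     string_delimiter: Optional[str] = None
--
--     for iline, _ in enumerate(line):
--         char = line[iline]
--
--         if string_delimiter and char != string_delimiter:
--             continue
--
--         if string_delimiter and char == string_delimiter:
--             string_delimiter = None
--             continue
--
--         if char in ('\'', '"'):
--             string_delimiter = char
--             continue
--
--         if char == '!':
--             return iline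
--
--     return None
-- ===== SOURCE B (Python) =====
-- from typing import List, Optional
--
-- def _comment_index(line: str) -> Optional[int]:
--     i = 0
--     n = len(line)
--     while i < n:
--         ch = line[i]
--         if ch in ('\'', '"'):
--             j = line.find(ch, i + 1)
--             if j == -1:
--                 return None
--             i = j + 1
--         elif ch == '!':
--             return i
--         else:
--             i += 1
--     return None
-- ===== Notes on version B (the rewrite author's own statement) =====
-- stated objective: alternative
-- what changed: Replaced the per-character state machine carrying a string_delimiter variable with an index-driven while loop that skips whole string regions via str.find and returns None when a string is unterminated.
import Mathlib
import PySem

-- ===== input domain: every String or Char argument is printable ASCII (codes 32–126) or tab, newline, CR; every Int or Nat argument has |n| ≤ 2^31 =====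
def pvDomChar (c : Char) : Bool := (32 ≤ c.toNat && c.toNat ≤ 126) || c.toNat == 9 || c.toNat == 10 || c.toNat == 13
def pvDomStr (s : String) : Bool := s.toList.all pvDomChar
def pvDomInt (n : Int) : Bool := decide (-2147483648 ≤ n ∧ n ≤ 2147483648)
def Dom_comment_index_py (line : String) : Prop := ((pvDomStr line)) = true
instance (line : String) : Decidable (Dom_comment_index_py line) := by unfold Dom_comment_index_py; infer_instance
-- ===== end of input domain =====

-- B replaces A's per-character delimiter state machine by an index loop that skips string regions via find; same values, alternative structure.

-- ===== PORT A =====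
-- A: scan each char, tracking the open string delimiter (Option Char).
def commentIndexGoA : List Char → Int → Option Char → Option Int
  | [], _, _ => none
  | c :: rest, i, some d =>
    if c ≠ d then commentIndexGoA rest (i + 1) (some d)
    else commentIndexGoA rest (i + 1) none
  | c :: rest, i, none =>
    if c = '\'' ∨ c = '"' then commentIndexGoA rest (i + 1) (some c)
    else if c = '!' then some i
    else commentIndexGoA rest (i + 1) none

def comment_index_py (line : String) : Option Int :=
  commentIndexGoA line.toList 0 none

-- ===== PORT B =====
-- B: line.find(ch, i+1) on the remaining suffix (relative index of first occurrence).
def commentIndexFind (d : Char) : List Char → Option Nat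
  | [] => none
  | c :: rest => if c = d then some 0 else (commentIndexFind d rest).map (· + 1)

def commentIndexGoB : List Char → Int → Option Int
  | [], _ => none
  | c :: rest, i =>
    if c = '\'' ∨ c = '"' then
      match commentIndexFind c rest with
      | none => none
      | some j => commentIndexGoB (rest.drop (j + 1)) (i + (j : Int) + 2)
    else if c = '!' then some i
    else commentIndexGoB rest (i + 1)
termination_by l _ => l.length
decreasing_by
  · simp [Nat.lt_succ_of_le, Nat.sub_le]
  · simp

def comment_index_py_alt (line : String) : Option Int :=
  commentIndexGoB line.toList 0

-- ===== PRECONDITION & SPEC =====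
def Spec_comment_index_py (line : String) (out : Option Int) : Prop := out = comment_index_py_alt line
instance (line : String) (out : Option Int) : Decidable (Spec_comment_index_py line out) := by unfold Spec_comment_index_py; infer_instance

-- ===== CLAIM (what is proved, stated in full; the proofs are below) =====
def Claim_equal_comment_index_py : Prop := ∀ (line : String), Dom_comment_index_py line → Spec_comment_index_py line (comment_index_py line)

-- ===== LEMMAS AND PROOFS =====

-- A's in-string scan equals find-then-resume.
theorem commentIndexGoA_some (d : Char) : ∀ (l : List Char) (i : Int),
    commentIndexGoA l i (some d) =
      (commentIndexFind d l).elim none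
        (fun j => commentIndexGoA (l.drop (j + 1)) (i + (j : Int) + 1) none) := by
  intro l
  induction l with
  | nil => intro i; simp [commentIndexGoA, commentIndexFind]
  | cons c rest ih =>
    intro i
    by_cases h : c = d
    · subst h
      simp [commentIndexGoA, commentIndexFind]
    · simp only [commentIndexGoA, commentIndexFind, if_neg h, if_pos (by simpa using h)]
      rw [ih (i + 1)]
      cases hf : commentIndexFind d rest with
      | none => simp
      | some j =>
        simp only [Option.map_some, Option.elim]
        have : i + 1 + (j : Int) + 1 = i + ((j + 1 : Nat) : Int) + 1 := by push_cast; ring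
        rw [this]
        rfl

theorem commentIndexGo_eq : ∀ (n : Nat) (l : List Char), l.length ≤ n → ∀ (i : Int),
    commentIndexGoA l i none = commentIndexGoB l i := by
  intro n
  induction n with
  | zero =>
    intro l hl i
    have : l = [] := List.eq_nil_of_length_eq_zero (Nat.le_zero.mp hl)
    subst this
    simp [commentIndexGoA, commentIndexGoB]
  | succ n ih =>
    intro l hl i
    cases l with
    | nil => simp [commentIndexGoA, commentIndexGoB]
    | cons c rest =>
      by_cases hq : c = '\'' ∨ c = '"'
      · rw [commentIndexGoB]
        simp only [commentIndexGoA, if_pos hq]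
        rw [commentIndexGoA_some]
        cases commentIndexFind c rest with
        | none => simp
        | some j =>
          simp only [Option.elim]
          have harith : i + 1 + (j : Int) + 1 = i + (j : Int) + 2 := by ring
          rw [harith]
          have hlen : (rest.drop (j + 1)).length ≤ rest.length := by
            simp [Nat.sub_le]
          exact ih _ (Nat.le_trans hlen (Nat.le_of_succ_le_succ hl)) _
      · by_cases hb : c = '!'
        · rw [commentIndexGoB]
          simp [commentIndexGoA, hb]
        · rw [commentIndexGoB]
          simp only [commentIndexGoA, if_neg hq, if_neg hb]
          exact ih rest (Nat.le_of_succ_le_succ hl) (i + 1)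

-- ===== VERDICT (by name: the statement is the Claim_ definition above) =====
theorem comment_index_py_spec : Claim_equal_comment_index_py := by
  intro line _
  unfold Spec_comment_index_py comment_index_py comment_index_py_alt
  exact commentIndexGo_eq line.toList.length line.toList (Nat.le_refl _) 0
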